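-- pv_equiv track=rewrite | github.com/theguyoverthere/CMU15-112-Spring17 | src/Week2/Homework/nthKaprekarNumber.py | nthKaprekarNumber
-- ===== SOURCE A (Python) =====
-- def digitCount(n):
--     if n == 0: return 1
--     count = 0
--     n = abs(n)
--
--     while n > 0:
--         count += 1
--         n //= 10
--     return count
--
-- def sumPartition(n, partitionSize):
--     lPart = 0
--     rPart = 0
--     m = n
--
--     for i in range(partitionSize):
--         nthDigit = m % 10
--         rPart += nthDigit * (10 ** i)
--         m //= 10
--
--     if rPart == 0: return -1
--     lPart = (n - rPart) // (10 ** partitionSize)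
--     return lPart + rPart
--
-- def isKaprekarNumber(n):
--     square    = n ** 2
--     numDigits = digitCount(square)
--
--     for i in range(numDigits):
--         if sumPartition(square, i + 1) == n: return True
--
--     return False
--
-- def nthKaprekarNumber(n):
--     found = 0
--     guess = 0
--
--     while found <= n:
--         guess += 1
--         if isKaprekarNumber(guess):
--             found += 1
--
--     return guess
-- ===== SOURCE B (Python) =====
-- def _isKaprekar(m):
--     # classical characterization: a number is Kaprekar exactly when some all-nines
--     # repunit q no smaller than it divides the product of it and its predecessor
--     t = m * m - m
--     q = 9
--     while q < m:
--         q = 10 * q + 9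
--     while True:
--         if t % q == 0:
--             return True
--         q = 10 * q + 9
--         if t < q:
--             return False
--
-- def nthKaprekarNumber(n):
--     count = n + 1
--     guess = 0
--     while count > 0:
--         guess += 1
--         count -= _isKaprekar(guess)
--     return guess
-- ===== Notes on version B (the rewrite author's own statement) =====
-- stated objective: alternative
-- what changed: B drops A's digit-splitting test (digit-count pass plus re-summing the low digits of the square for every partition size) and instead uses Kaprekar's number-theoretic characterization -- a candidate qualifies exactly when some all-nines repunit no smaller than the candidate divides the product of the candidate and its predecessor -- so per candidate it runs a handful of divisibility checks with no square-splitting at all, and the driver counts down the remaining quota instead of counting matches upward.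
import Mathlib
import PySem

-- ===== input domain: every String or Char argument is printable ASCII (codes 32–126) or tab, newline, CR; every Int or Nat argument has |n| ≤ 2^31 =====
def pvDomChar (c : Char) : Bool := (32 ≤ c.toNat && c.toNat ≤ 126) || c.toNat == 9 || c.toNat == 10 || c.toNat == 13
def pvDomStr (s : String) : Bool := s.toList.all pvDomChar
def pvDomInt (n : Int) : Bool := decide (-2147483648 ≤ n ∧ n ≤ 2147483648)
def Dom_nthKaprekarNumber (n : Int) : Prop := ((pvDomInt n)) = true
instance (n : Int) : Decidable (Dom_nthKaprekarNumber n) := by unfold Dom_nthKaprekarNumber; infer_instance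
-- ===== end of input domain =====

-- B drops A's digit-splitting Kaprekar test (digitCount pass + per-partition digit re-summing)
-- for Kaprekar's number-theoretic characterization: a candidate qualifies exactly when some
-- all-nines repunit no smaller than it divides the product of it and its predecessor
-- (objective: alternative).

-- ===== PORT A =====
-- while n > 0: count += 1; n //= 10
def digitCountLoop (count : Int) (n : Int) : Int :=
  if _h : 0 < n then digitCountLoop (count + 1) (PySem.Int.floordiv n 10) else count
termination_by n.toNat
decreasing_by
  simp only [PySem.Int.floordiv_eq_ediv_of_pos (by norm_num : (0:Int) < 10)]
  omega

def digitCount (n : Int) : Int :=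
  if n == 0 then 1 else digitCountLoop 0 (Int.natAbs n : Int)

-- the for-loop carries the state (rPart, m); 10 ** i with i ≥ 0 is (10:Int) ^ i.toNat (exact there)
def sumPartition (n : Int) (partitionSize : Int) : Int :=
  let s := (PySem.List.pyRange 0 partitionSize 1).foldl
    (fun (s : Int × Int) (i : Int) =>
      let nthDigit := PySem.Int.mod s.2 10
      (s.1 + nthDigit * (10:Int) ^ i.toNat, PySem.Int.floordiv s.2 10))
    ((0 : Int), n)
  if s.1 == 0 then -1
  else PySem.Int.floordiv (n - s.1) ((10:Int) ^ partitionSize.toNat) + s.1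

-- 'for i in range(numDigits): if …: return True' / 'return False' is List.any
def isKaprekarNumber (n : Int) : Bool :=
  let square := n ^ 2
  let numDigits := digitCount square
  (PySem.List.pyRange 0 numDigits 1).any (fun i => sumPartition square (i + 1) == n)

def nthKaprekarLoop (n : Int) : Nat → Int → Int → Int
  | 0, _, guess => guess
  | fuel + 1, found, guess =>
    if found ≤ n then
      let guess' := guess + 1
      if isKaprekarNumber guess' then nthKaprekarLoop n fuel (found + 1) guess'
      else nthKaprekarLoop n fuel found guess'
    else guess

-- fuel guard only (the Python loop is unbounded): 10^(n+1) strictly exceeds the number of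
-- iterations, since 10^k - 1 is a Kaprekar number for every k ≥ 1, so the final guess < 10^(n+1)
def nthKaprekarNumber (n : Int) : Int := nthKaprekarLoop n (10 ^ (n + 1).toNat) 0 0

-- ===== PORT B =====
-- while q < m: q = 10 * q + 9      (fuel guard only: the loop needs at most (m-9).toNat steps)
def kapLoop1 : Nat → Int → Int → Int
  | 0, _, q => q
  | fuel + 1, m, q => if q < m then kapLoop1 fuel m (10 * q + 9) else q

-- while True: if t % q == 0: return True; q = 10*q + 9; if t < q: return False
-- (fuel guard only: q grows past t in at most t.toNat steps)
def kapLoop2 : Nat → Int → Int → Bool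
  | 0, _, _ => false
  | fuel + 1, t, q =>
    if PySem.Int.mod t q == 0 then true
    else if t < 10 * q + 9 then false
    else kapLoop2 fuel t (10 * q + 9)

def isKaprekarAlt (m : Int) : Bool :=
  let t := m * m - m
  kapLoop2 (t.toNat + 1) t (kapLoop1 (m.toNat + 1) m 9)

def nthKapAltLoop (n : Int) : Nat → Int → Int → Int
  | 0, _, guess => guess
  | fuel + 1, count, guess =>
    if 0 < count then
      let guess' := guess + 1
      nthKapAltLoop n fuel (count - (if isKaprekarAlt guess' then 1 else 0)) guess'
    else guess

def nthKaprekarNumber_alt (n : Int) : Int := nthKapAltLoop n (10 ^ (n + 1).toNat) (n + 1) 0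

-- ===== PRECONDITION & SPEC =====
def Spec_nthKaprekarNumber (n : Int) (out : Int) : Prop := out = nthKaprekarNumber_alt n
instance (n : Int) (out : Int) : Decidable (Spec_nthKaprekarNumber n out) := by unfold Spec_nthKaprekarNumber; infer_instance

-- ===== CLAIM (what is proved, stated in full; the proofs are below) =====
def Claim_equal_nthKaprekarNumber : Prop := ∀ (n : Int), Dom_nthKaprekarNumber n → Spec_nthKaprekarNumber n (nthKaprekarNumber n)

-- ===== LEMMAS AND PROOFS =====

-- the shared per-position condition A's check decides at split position k (power 10^(k+1))
def kapCond (m sq : Int) (k : Nat) : Bool :=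
  sq % (10:Int) ^ (k+1) ≠ 0 ∧ sq / (10:Int) ^ (k+1) + sq % (10:Int) ^ (k+1) = m

lemma int_mod_pow_succ (m : Nat) (k : Nat) :
    (m:Int) % (10:Int)^(k+1) = (m:Int) % 10^k + ((m:Int) / 10^k % 10) * 10^k := by
  have h := @Nat.mod_pow_succ m 10 k
  zify at h
  linarith [h]

lemma sumPartition_fold (x : Int) (hx : 0 ≤ x) : ∀ (k : Nat),
    (PySem.List.pyRange 0 (k : Int) 1).foldl
      (fun (s : Int × Int) (i : Int) =>
        let nthDigit := PySem.Int.mod s.2 10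
        (s.1 + nthDigit * (10:Int) ^ i.toNat, PySem.Int.floordiv s.2 10))
      ((0 : Int), x)
    = (x % (10:Int) ^ k, x / (10:Int) ^ k) := by
  intro k
  induction k with
  | zero => simp [PySem.List.pyRange_one_eq_nil]
  | succ k ih =>
    have hsplit : PySem.List.pyRange 0 ((k+1 : Nat) : Int) 1
        = PySem.List.pyRange 0 (k : Int) 1 ++ [(k : Int)] := by
      push_cast
      exact PySem.List.pyRange_one_succ_right (by positivity)
    rw [hsplit, List.foldl_append, ih]
    simp only [PySem.Int.mod_eq_emod_of_pos (by norm_num : (0:Int) < 10),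
      PySem.Int.floordiv_eq_ediv_of_pos (by norm_num : (0:Int) < 10)]
    obtain ⟨m, rfl⟩ := Int.eq_ofNat_of_zero_le hx
    refine Prod.ext ?_ ?_
    · simpa using (int_mod_pow_succ m k).symm
    · simp [Int.ediv_ediv_of_nonneg (by positivity : (0:Int) ≤ 10^k), pow_succ]

lemma sumPartition_eq (x m : Int) (hx : 0 ≤ x) (hm : 1 ≤ m) (k : Nat) :
    (sumPartition x ((k : Int) + 1) == m) = kapCond m x k := by
  unfold sumPartition kapCond
  have hcast : ((k : Int) + 1) = ((k + 1 : Nat) : Int) := by push_cast; ring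
  rw [hcast, sumPartition_fold x hx (k + 1)]
  simp only [Int.toNat_natCast]
  by_cases hr : x % (10:Int) ^ (k + 1) = 0
  · simp only [hr]
    simp
    omega
  · have hbeq : (x % (10:Int) ^ (k + 1) == 0) = false := by simp [hr]
    have hP : (0:Int) < 10 ^ (k + 1) := by positivity
    have hsub : x - x % (10:Int) ^ (k + 1) = 10 ^ (k + 1) * (x / 10 ^ (k + 1)) := by
      have := Int.emod_add_mul_ediv x ((10:Int) ^ (k + 1))
      linarith
    simp only [hbeq, Bool.false_eq_true, if_false]
    rw [PySem.Int.floordiv_eq_ediv_of_pos hP, hsub, Int.mul_ediv_cancel_left _ (by omega)]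
    simp only [hr, ne_eq, not_false_iff, true_and]
    rfl

lemma digitCountLoop_spec : ∀ (N : Nat) (x : Int), x.toNat ≤ N → 0 < x → ∀ (c : Int),
    digitCountLoop c x = c + ((Nat.log 10 x.toNat : Int) + 1) := by
  intro N
  induction N with
  | zero => intro x hN hx; omega
  | succ N ih =>
    intro x hN hx c
    rw [digitCountLoop]
    simp only [hx, dite_true, PySem.Int.floordiv_eq_ediv_of_pos (by norm_num : (0:Int) < 10)]
    by_cases hy : 0 < x / 10
    · have htn : (x / 10).toNat = x.toNat / 10 := by omega
      rw [ih (x / 10) (by omega) hy (c + 1), htn]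
      have hlog : Nat.log 10 x.toNat = Nat.log 10 (x.toNat / 10) + 1 := by
        have h1 : 0 < Nat.log 10 x.toNat := Nat.log_pos (by norm_num) (by omega)
        have h2 := Nat.log_div_base 10 x.toNat
        omega
      rw [hlog]; push_cast; ring
    · rw [digitCountLoop]
      simp only [hy, dite_false]
      have : Nat.log 10 x.toNat = 0 := Nat.log_eq_zero_iff.mpr (by omega)
      rw [this]; ring

lemma digitCount_eq (x : Int) (hx : 1 ≤ x) :
    digitCount x = (Nat.log 10 x.toNat : Int) + 1 := by
  unfold digitCount
  have h0 : (x == 0) = false := by simp; omega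
  rw [h0]
  simp only [Bool.false_eq_true, if_false]
  have hnat : ((x.natAbs : Nat) : Int) = x := by omega
  rw [hnat, digitCountLoop_spec x.toNat x le_rfl (by omega) 0]
  ring

lemma digitCount_lt_iff (x : Int) (hx : 1 ≤ x) (j : Nat) :
    ((j : Int) < digitCount x) ↔ (10:Int) ^ j ≤ x := by
  rw [digitCount_eq x hx]
  have hlog : j ≤ Nat.log 10 x.toNat ↔ (10:Nat) ^ j ≤ x.toNat :=
    Nat.le_log_iff_pow_le (by norm_num) (by omega)
  have hcast : (10:Int) ^ j ≤ x ↔ (10:Nat) ^ j ≤ x.toNat := by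
    rw [show ((10:Int) ^ j) = (((10 ^ j : Nat) : Int)) by push_cast; ring]
    omega
  constructor
  · intro h
    exact hcast.mpr (hlog.mp (by omega))
  · intro h
    have := hlog.mpr (hcast.mp h)
    omega

-- A's whole check is the 'any' of kapCond over the split positions
lemma isKapA_eq_any (m : Int) (hm : 1 ≤ m) :
    isKaprekarNumber m
      = (List.range' 0 ((digitCount (m * m)).toNat)).any (fun k => kapCond m (m * m) k) := by
  unfold isKaprekarNumber
  dsimp only []
  have hb : m ^ 2 = m * m := sq m
  have hsq : 1 ≤ m * m := by nlinarith
  rw [hb]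
  have hd1 : 1 ≤ digitCount (m * m) := by
    rw [digitCount_eq _ hsq]
    have : (0:Int) ≤ (Nat.log 10 (m * m).toNat : Int) := by positivity
    omega
  rw [show digitCount (m * m) = (((digitCount (m * m)).toNat : Nat) : Int) by omega,
    PySem.List.pyRange_zero_natCast, List.any_map]
  rw [List.range_eq_range']
  exact List.any_congr rfl (fun k => sumPartition_eq (m * m) m (by nlinarith) hm k)

-- arithmetic core: A's split condition at divisor P equals "m < P and (P-1) | m*(m-1)"
lemma split_iff (m P : Int) (hm : 1 ≤ m) (hP : 2 ≤ P) :
    (m * m % P ≠ 0 ∧ m * m / P + m * m % P = m) ↔ (m < P ∧ (P - 1) ∣ (m * m - m)) := by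
  have hP0 : (0:Int) < P := by omega
  have hdm := Int.ediv_add_emod (m * m) P
  have hr0 : 0 ≤ m * m % P := Int.emod_nonneg _ (by omega)
  have hrP : m * m % P < P := Int.emod_lt_of_pos _ hP0
  constructor
  · rintro ⟨hr, hlr⟩
    set r := m * m % P with hrdef
    set l := m * m / P with hldef
    have hr1 : 1 ≤ r := by omega
    have hmP : m < P := by nlinarith
    refine ⟨hmP, ⟨l, by nlinarith⟩⟩
  · rintro ⟨hmP, c, hc⟩
    have hc0 : 0 ≤ c := by nlinarith
    have hcm : c < m := by nlinarith
    have hsum : m * m = (m - c) + c * P := by nlinarith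
    have hdiv : m * m / P = c ∧ m * m % P = m - c := by
      constructor
      · rw [hsum, Int.add_mul_ediv_right _ _ (by omega : P ≠ 0),
          Int.ediv_eq_zero_of_lt (by omega) (by omega)]
        ring
      · rw [hsum, Int.add_mul_emod_self_right _ _ _]
        exact Int.emod_eq_of_lt (by omega) (by omega)
    rw [hdiv.1, hdiv.2]
    constructor
    · omega
    · omega

lemma kapCond_iff (m : Int) (hm : 1 ≤ m) (k : Nat) :
    (kapCond m (m * m) k = true)
      ↔ (m < (10:Int) ^ (k+1) ∧ ((10:Int) ^ (k+1) - 1) ∣ (m * m - m)) := by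
  have hP : (2:Int) ≤ 10 ^ (k+1) := by
    calc (2:Int) ≤ 10 ^ 1 := by norm_num
    _ ≤ 10 ^ (k+1) := by
      apply pow_le_pow_right₀ (by norm_num) (by omega)
  unfold kapCond
  rw [show (decide (m*m % (10:Int)^(k+1) ≠ 0 ∧ m*m / (10:Int)^(k+1) + m*m % (10:Int)^(k+1) = m) = true)
      ↔ (m*m % (10:Int)^(k+1) ≠ 0 ∧ m*m / (10:Int)^(k+1) + m*m % (10:Int)^(k+1) = m) from by simp]
  exact split_iff m _ hm hP

-- kapLoop1 returns the least power-minus-one ≥ m above its start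
lemma kapLoop1_spec : ∀ (N : Nat) (m q : Int), (m - q).toNat ≤ N →
    ∀ d : Nat, q = (10:Int) ^ (d+1) - 1 →
    ∃ d', d ≤ d' ∧ kapLoop1 N m q = (10:Int) ^ (d'+1) - 1 ∧ m ≤ (10:Int) ^ (d'+1) - 1 ∧
      (∀ e : Nat, d ≤ e → m ≤ (10:Int) ^ (e+1) - 1 → d' ≤ e) := by
  intro N
  induction N with
  | zero =>
    intro m q hN d hd
    have hlt : ¬ q < m := by omega
    rw [kapLoop1]
    exact ⟨d, le_rfl, hd, by omega, fun e he _ => he⟩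
  | succ N ih =>
    intro m q hN d hd
    rw [kapLoop1]
    by_cases h : q < m
    · rw [if_pos h]
      have hq0 : (0:Int) < 10 ^ (d+1) := by positivity
      have hps : (10:Int) ^ (d+1+1) = 10 ^ (d+1) * 10 := pow_succ 10 (d+1)
      have hq' : 10 * q + 9 = (10:Int) ^ (d+1+1) - 1 := by rw [hd]; linarith
      obtain ⟨d', hdd, hres, hm, hmin⟩ := ih m (10 * q + 9) (by omega) (d+1) hq'
      refine ⟨d', by omega, hres, hm, ?_⟩
      intro e he hme
      rcases Nat.lt_or_ge d e with h1 | h2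
      · exact hmin e (by omega) hme
      · have : e = d := by omega
        subst this
        rw [← hd] at hme
        omega
    · rw [if_neg h]
      exact ⟨d, le_rfl, hd, by omega, fun e he _ => he⟩

lemma kapLoop2_sound : ∀ (N : Nat) (t q : Int), ∀ d : Nat, q = (10:Int) ^ (d+1) - 1 →
    kapLoop2 N t q = true → ∃ e : Nat, d ≤ e ∧ ((10:Int) ^ (e+1) - 1) ∣ t := by
  intro N
  induction N with
  | zero =>
    intro t q d hd htrue
    rw [kapLoop2] at htrue
    exact absurd htrue (by simp)
  | succ N ih =>
    intro t q d hd htrue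
    rw [kapLoop2] at htrue
    by_cases h1 : PySem.Int.mod t q = 0
    · exact ⟨d, le_rfl, hd ▸ (PySem.Int.mod_eq_zero_iff_dvd t q).mp h1⟩
    · simp only [beq_iff_eq, h1, if_false] at htrue
      by_cases h2 : t < 10 * q + 9
      · simp [h2] at htrue
      · rw [if_neg h2] at htrue
        have hps : (10:Int) ^ (d+1+1) = 10 ^ (d+1) * 10 := pow_succ 10 (d+1)
        have hq' : 10 * q + 9 = (10:Int) ^ (d+1+1) - 1 := by rw [hd]; linarith
        obtain ⟨e, hde, hdvd⟩ := ih t (10 * q + 9) (d+1) hq' htrue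
        exact ⟨e, by omega, hdvd⟩

lemma kapLoop2_complete : ∀ (k : Nat) (t : Int) (d e : Nat), 0 ≤ t → d ≤ e → k = e - d →
    ((10:Int) ^ (e+1) - 1) ∣ t → ∀ F : Nat, k < F → kapLoop2 F t ((10:Int) ^ (d+1) - 1) = true := by
  intro k
  induction k with
  | zero =>
    intro t d e ht hde hk hdvd F hF
    have hed : e = d := by omega
    subst hed
    match F, hF with
    | F' + 1, _ =>
      rw [kapLoop2, (PySem.Int.mod_eq_zero_iff_dvd t _).mpr hdvd]
      simp
  | succ k ih =>
    intro t d e ht hde hk hdvd F hF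
    match F, hF with
    | F' + 1, hF =>
      rw [kapLoop2]
      by_cases h1 : PySem.Int.mod t ((10:Int) ^ (d+1) - 1) = 0
      · simp [h1]
      · simp only [beq_iff_eq, h1, if_false]
        have hde' : d < e := by omega
        have ht0 : 0 < t := by
          rcases lt_or_eq_of_le ht with h | h
          · exact h
          · exfalso
            apply h1
            rw [← h]
            simp [PySem.Int.mod]
        have hle : (10:Int) ^ (e+1) - 1 ≤ t :=
          le_trans (by omega) (Int.le_of_dvd ht0 hdvd)
        have hmono : (10:Int) ^ (d+1+1) ≤ 10 ^ (e+1) :=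
          pow_le_pow_right₀ (by norm_num) (by omega)
        have hps : (10:Int) ^ (d+1+1) = 10 ^ (d+1) * 10 := pow_succ 10 (d+1)
        have hq' : 10 * ((10:Int) ^ (d+1) - 1) + 9 = (10:Int) ^ (d+1+1) - 1 := by linarith
        have h2 : ¬ t < 10 * ((10:Int) ^ (d+1) - 1) + 9 := by omega
        rw [if_neg h2, hq']
        exact ih t (d+1) e ht (by omega) (by omega) hdvd F' (by omega)

lemma isKapB_iff (m : Int) (hm : 1 ≤ m) :
    (isKaprekarAlt m = true)
      ↔ ∃ e : Nat, m ≤ (10:Int) ^ (e+1) - 1 ∧ ((10:Int) ^ (e+1) - 1) ∣ (m * m - m) := by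
  unfold isKaprekarAlt
  dsimp only []
  obtain ⟨d', hd0, hres, hmd, hmin⟩ :=
    kapLoop1_spec (m.toNat + 1) m 9 (by omega) 0 (by norm_num)
  have hqpos : (0:Int) < 10 ^ (d'+1) - 1 := by
    have : (10:Int) ^ 1 ≤ 10 ^ (d'+1) := pow_le_pow_right₀ (by norm_num) (by omega)
    simp at this
    omega
  rw [hres]
  have ht : 0 ≤ m * m - m := by nlinarith
  constructor
  · intro htrue
    obtain ⟨e, hde, hdvd⟩ := kapLoop2_sound ((m * m - m).toNat + 1) _ _ d' rfl htrue
    have : (10:Int) ^ (d'+1) ≤ 10 ^ (e+1) := pow_le_pow_right₀ (by norm_num) (by omega)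
    exact ⟨e, by omega, hdvd⟩
  · rintro ⟨e, hme, hdvd⟩
    have hde : d' ≤ e := hmin e (by omega) hme
    by_cases ht0 : m * m - m = 0
    · rw [ht0]
      rw [kapLoop2]
      rw [show PySem.Int.mod 0 ((10:Int) ^ (d'+1) - 1) = 0 by
        rw [PySem.Int.mod_eq_emod_of_pos hqpos]; simp]
      simp
    · have htp : 0 < m * m - m := by omega
      have hlee : (10:Int) ^ (e+1) - 1 ≤ m * m - m := Int.le_of_dvd htp hdvd
      have hn2 : e + 2 ≤ 2 ^ (e+1) := by
        have := Nat.lt_two_pow_self (n := e+1)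
        omega
      have hpp : (2:Int) ^ (e+1) ≤ 10 ^ (e+1) := pow_le_pow_left₀ (by norm_num) (by norm_num) _
      have hei : (e:Int) + 2 ≤ 10 ^ (e+1) := by
        calc ((e:Int) + 2) ≤ (2:Int) ^ (e+1) := by exact_mod_cast hn2
        _ ≤ 10 ^ (e+1) := hpp
      have hef : (e:Int) < m * m - m := by linarith
      exact kapLoop2_complete (e - d') _ d' e ht hde rfl hdvd _ (by omega)

lemma isKapA_iff (m : Int) (hm : 1 ≤ m) :
    (isKaprekarNumber m = true)
      ↔ ∃ e : Nat, m ≤ (10:Int) ^ (e+1) - 1 ∧ ((10:Int) ^ (e+1) - 1) ∣ (m * m - m) := by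
  have hsq : 1 ≤ m * m := by nlinarith
  rw [isKapA_eq_any m hm, List.any_eq_true]
  constructor
  · rintro ⟨k, hk, hcond⟩
    obtain ⟨hmk, hdvd⟩ := (kapCond_iff m hm k).mp hcond
    exact ⟨k, by omega, hdvd⟩
  · rintro ⟨e, hme, hdvd⟩
    rcases lt_or_eq_of_le hm with hm2 | hm1
    · -- m ≥ 2: the witness position itself lies below digitCount (m*m)
      have ht0 : 0 < m * m - m := by nlinarith
      have hle : (10:Int) ^ (e+1) - 1 ≤ m * m - m := Int.le_of_dvd ht0 hdvd
      have hmono : (10:Int) ^ e ≤ 10 ^ (e+1) := pow_le_pow_right₀ (by norm_num) (by omega)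
      have hpow : (10:Int) ^ e ≤ m * m := by omega
      have hD : (e : Int) < digitCount (m * m) := (digitCount_lt_iff _ hsq e).mpr hpow
      refine ⟨e, ?_, (kapCond_iff m hm e).mpr ⟨by omega, hdvd⟩⟩
      have := List.mem_range'_1.mpr (⟨by omega, ?_⟩ : 0 ≤ e ∧ e < 0 + (digitCount (m * m)).toNat)
      · exact this
      · omega
    · -- m = 1: position 0 works (9 divides 0) and digitCount 1 = 1
      subst hm1
      have hD : (0 : Int) < digitCount 1 := by
        have := (digitCount_lt_iff 1 (by norm_num) 0).mpr (by norm_num)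
        simpa using this
      refine ⟨0, ?_, (kapCond_iff 1 (by norm_num) 0).mpr ⟨by norm_num, by norm_num⟩⟩
      refine List.mem_range'_1.mpr ⟨by omega, ?_⟩
      norm_num at hD ⊢
      omega

lemma isKap_eq (m : Int) (hm : 1 ≤ m) : isKaprekarNumber m = isKaprekarAlt m := by
  have := (isKapA_iff m hm).trans (isKapB_iff m hm).symm
  exact Bool.eq_iff_iff.mpr this

lemma loops_eq (n : Int) : ∀ (fuel : Nat) (found guess : Int), 0 ≤ guess →
    nthKaprekarLoop n fuel found guess = nthKapAltLoop n fuel (n + 1 - found) guess := by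
  intro fuel
  induction fuel with
  | zero => intro found guess _; rfl
  | succ f ih =>
    intro found guess hg
    simp only [nthKaprekarLoop, nthKapAltLoop, isKap_eq (guess + 1) (by omega)]
    have hiff : (found ≤ n) ↔ (0 < n + 1 - found) := by omega
    by_cases h : found ≤ n
    · rw [if_pos h, if_pos (hiff.mp h)]
      by_cases hk : isKaprekarAlt (guess + 1) = true
      · simp only [hk, if_true]
        rw [ih (found + 1) (guess + 1) (by omega)]
        congr 1
        omega
      · simp only [Bool.not_eq_true] at hk
        simp only [hk, Bool.false_eq_true, if_false]
        rw [ih found (guess + 1) (by omega)]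
        congr 1
        omega
    · rw [if_neg h, if_neg (fun hc => h (hiff.mpr hc))]

-- ===== VERDICT (by name: the statement is the Claim_ definition above) =====
theorem nthKaprekarNumber_spec : Claim_equal_nthKaprekarNumber := by
  intro n _
  unfold Spec_nthKaprekarNumber nthKaprekarNumber nthKaprekarNumber_alt
  have := loops_eq n (10 ^ (n + 1).toNat) 0 0 le_rfl
  simpa using this
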